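-- pv_equiv track=rewrite | github.com/zeus6768/codingtest | baekjoon/solved/1992.py | whole
-- ===== SOURCE A (Python) =====
-- def whole(image):
-- 	prev = image[0][0]
-- 	for i in range(len(image)):
-- 		for j in range(len(image)):
-- 			if prev != image[i][j]:
-- 				return False
-- 			prev = image[i][j]
-- 	return True
-- ===== SOURCE B (Python) =====
-- def whole(image):
--     n = len(image)
--     first_row = image[0][:n]
--     return len(set(first_row)) <= 1 and all(row[:n] == first_row for row in image)
-- ===== Notes on version B (the rewrite author's own statement) =====
-- stated objective: alternative
-- what changed: Replaces A's cell-by-cell nested scan with a running prev and early return by a row-level check: slice each row to its first len(image) cells and require that the first row's prefix holds a single distinct value (a set) and that every row's prefix equals it wholesale.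
import Mathlib
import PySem

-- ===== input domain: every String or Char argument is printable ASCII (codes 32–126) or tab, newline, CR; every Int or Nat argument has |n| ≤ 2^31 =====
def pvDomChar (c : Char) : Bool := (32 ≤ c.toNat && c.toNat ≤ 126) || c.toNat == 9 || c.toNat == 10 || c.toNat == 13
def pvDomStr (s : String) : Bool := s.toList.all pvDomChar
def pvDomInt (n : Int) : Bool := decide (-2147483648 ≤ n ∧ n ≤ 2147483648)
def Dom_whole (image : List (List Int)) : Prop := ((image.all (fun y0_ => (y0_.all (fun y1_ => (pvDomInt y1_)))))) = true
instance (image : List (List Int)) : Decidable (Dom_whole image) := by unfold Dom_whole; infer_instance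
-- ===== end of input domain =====

-- B replaces A's cell-by-cell scan with a running prev and early exit by a row-level check:
-- the first row's n-prefix must hold a single distinct value (a set) and every row's n-prefix
-- must equal it (objective: alternative); proved equal on Pre_ (exactly A's returning domain).

-- ===== PORT A =====
-- Early 'return False' is modelled by freezing the state at (some false, prev).
def whole (image : List (List Int)) : Bool :=
  let prev := PySem.List.pyGetD (PySem.List.pyGetD image 0 []) 0 0
  let res := (PySem.List.pyRange 0 (image.length : Int) 1).foldl (fun st i =>
      (PySem.List.pyRange 0 (image.length : Int) 1).foldl (fun st j =>
        match st with
        | (some b, p) => (some b, p)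
        | (none, p) =>
            if p ≠ PySem.List.pyGetD (PySem.List.pyGetD image i []) j 0 then (some false, p)
            else (none, PySem.List.pyGetD (PySem.List.pyGetD image i []) j 0)) st)
    ((none : Option Bool), prev)
  match res with
  | (some b, _) => b
  | (none, _) => true

-- ===== PORT B =====
def whole_alt (image : List (List Int)) : Bool :=
  let firstRow := PySem.List.slice (PySem.List.pyGetD image 0 []) none (some (image.length : Int))
  decide (PySem.Set.len (PySem.Set.ofList firstRow) ≤ 1)
    && image.all (fun row => PySem.List.slice row none (some (image.length : Int)) == firstRow)

-- ===== PRECONDITION & SPEC =====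
-- Pre_ is exactly the domain on which Python A returns normally: the grid is nonempty and, whenever a
-- row i is shorter than len(image) (so the scan would hit a missing cell), some in-bounds cell strictly
-- before that missing cell already differs from image[0][0], making A return False first.
def Pre_whole (image : List (List Int)) : Prop :=
  image ≠ [] ∧
  ∀ i < image.length, (image.getD i []).length < image.length →
    ∃ i' ≤ i, ∃ j' < image.length,
      (i' < i ∨ j' < (image.getD i []).length) ∧
      j' < (image.getD i' []).length ∧
      (image.getD i' []).getD j' 0 ≠ (image.getD 0 []).getD 0 0
instance (image : List (List Int)) : Decidable (Pre_whole image) := by unfold Pre_whole; infer_instance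
def pvWitness_whole : List (List Int) := [[1, 1], [1, 1]]

def Spec_whole (image : List (List Int)) (out : Bool) : Prop := out = whole_alt image
instance (image : List (List Int)) (out : Bool) : Decidable (Spec_whole image out) := by unfold Spec_whole; infer_instance

-- ===== CLAIM (what is proved, stated in full; the proofs are below) =====
def Claim_equal_whole : Prop := ∀ (image : List (List Int)), Dom_whole image → Pre_whole image → Spec_whole image (whole image)

-- ===== LEMMAS AND PROOFS =====

-- first cell, as Nat-indexed getD
def pvFirst (image : List (List Int)) : Int := (image.getD 0 []).getD 0 0

-- inner loop keeps a frozen 'some' state frozen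
theorem pv_inner_frozen (g : Int → Int) (l : List Int) (b : Bool) (p : Int) :
    l.foldl (fun st j =>
        match st with
        | (some b', q) => (some b', q)
        | (none, q) => if q ≠ g j then (some false, q) else (none, g j)) ((some b, p) : Option Bool × Int)
      = (some b, p) := by
  induction l with
  | nil => rfl
  | cons x t ih => simpa using ih

-- one loop level: the state stays (none, p) while every value equals p, else freezes at (some false, p)
theorem pv_inner_loop (g : Int → Int) (l : List Int) (p : Int) :
    l.foldl (fun st j =>
        match st with
        | (some b', q) => (some b', q)
        | (none, q) => if q ≠ g j then (some false, q) else (none, g j)) ((none, p) : Option Bool × Int)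
      = if l.all (fun j => g j == p) then ((none : Option Bool), p) else (some false, p) := by
  induction l with
  | nil => simp
  | cons x t ih =>
    simp only [List.foldl_cons, List.all_cons]
    by_cases h : p = g x
    · rw [show (if p ≠ g x then ((some false, p) : Option Bool × Int) else (none, g x)) = (none, p) by
        simp [h]]
      rw [ih]
      have hb : (g x == p) = true := by simp [← h]
      simp [hb]
    · rw [show (if p ≠ g x then ((some false, p) : Option Bool × Int) else (none, g x)) = (some false, p) by
        simp [h]]
      rw [pv_inner_frozen]
      have hb : (g x == p) = false := by simp [Ne.symm h]
      simp [hb]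

-- nested loops
theorem pv_outer_loop (v : Int → Int → Int) (L J : List Int) (p : Int) :
    L.foldl (fun st i =>
      J.foldl (fun st j =>
        match st with
        | (some b', q) => (some b', q)
        | (none, q) => if q ≠ v i j then (some false, q) else (none, v i j)) st) ((none, p) : Option Bool × Int)
      = if L.all (fun i => J.all (fun j => v i j == p)) then ((none : Option Bool), p) else (some false, p) := by
  induction L with
  | nil => simp
  | cons i t ih =>
    simp only [List.foldl_cons, List.all_cons]
    rw [pv_inner_loop (v i) J p]
    by_cases h : (J.all fun j => v i j == p) = true
    · rw [if_pos h, ih]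
      simp [h]
    · rw [if_neg h]
      have frz : ∀ (t' : List Int), t'.foldl (fun st i' =>
          J.foldl (fun st j =>
            match st with
            | (some b', q) => (some b', q)
            | (none, q) => if q ≠ v i' j then (some false, q) else (none, v i' j)) st)
          ((some false, p) : Option Bool × Int) = (some false, p) := by
        intro t'
        induction t' with
        | nil => rfl
        | cons y ys ihy => simp only [List.foldl_cons]; rw [pv_inner_frozen]; exact ihy
      rw [frz t]
      have hb : (J.all fun j => v i j == p) = false := by simpa using h
      simp [hb]

-- all over range(0, n)
theorem pv_all_pyRange (n : Nat) (f : Int → Bool) :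
    ((PySem.List.pyRange 0 (n : Int) 1).all f = true) ↔ ∀ k < n, f (k : Int) = true := by
  simp only [List.all_eq_true, PySem.List.mem_pyRange_one]
  constructor
  · intro h k hk
    exact h (k : Int) ⟨Int.natCast_nonneg k, by exact_mod_cast hk⟩
  · rintro h x ⟨hx0, hxn⟩
    lift x to Nat using hx0
    exact h x (by exact_mod_cast hxn)

-- len(set(l)) <= 1 says exactly that l is constant
theorem pv_set_le_one (l : List Int) :
    PySem.Set.len (PySem.Set.ofList l) ≤ 1 ↔ ∀ a ∈ l, ∀ b ∈ l, a = b := by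
  constructor
  · intro h a ha b hb
    have ha' : a ∈ PySem.Set.ofList l := (PySem.Set.mem_ofList _ _).mpr ha
    have hb' : b ∈ PySem.Set.ofList l := (PySem.Set.mem_ofList _ _).mpr hb
    match hs : PySem.Set.ofList l with
    | [] => rw [hs] at ha'; simp at ha'
    | [x] =>
      rw [hs] at ha' hb'
      simp at ha' hb'; omega
    | x :: y :: t => rw [hs] at h; simp [PySem.Set.len] at h; omega
  · intro h
    have hnd := PySem.Set.nodup_ofList (xs := l)
    match hs : PySem.Set.ofList l with
    | [] => simp [PySem.Set.len]
    | [x] => simp [PySem.Set.len]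
    | x :: y :: t =>
      exfalso
      have hx : x ∈ l := (PySem.Set.mem_ofList _ _).mp (by rw [hs]; simp)
      have hy : y ∈ l := (PySem.Set.mem_ofList _ _).mp (by rw [hs]; simp)
      rw [hs] at hnd
      exact (List.nodup_cons.mp hnd).1 (by simp [h x hx y hy])

-- A returns true iff every (defaulted) cell of the n×n scan window equals image[0][0]
theorem pv_A_char (image : List (List Int)) :
    whole image = true ↔
      ∀ a < image.length, ∀ b < image.length, (image.getD a []).getD b 0 = pvFirst image := by
  unfold whole
  simp only []
  rw [pv_outer_loop (fun i j => PySem.List.pyGetD (PySem.List.pyGetD image i []) j 0)]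
  split_ifs with h
  · simp only [true_iff]
    rw [pv_all_pyRange] at h
    intro a ha b hb
    have := (pv_all_pyRange image.length _).mp (h a ha) b hb
    simpa [pvFirst, PySem.List.pyGetD_natCast, PySem.List.pyGetD_zero] using this
  · simp only [false_iff]
    intro hall
    apply h
    rw [pv_all_pyRange]
    intro a ha
    rw [pv_all_pyRange]
    intro b hb
    simpa [pvFirst, PySem.List.pyGetD_natCast, PySem.List.pyGetD_zero] using hall a ha b hb
  -- the frozen-false branch returns false, handled above

-- B returns true iff the first-row prefix is constant and every row prefix equals it
theorem pv_B_char (image : List (List Int)) :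
    whole_alt image = true ↔
      ((∀ x ∈ (image.getD 0 []).take image.length, ∀ y ∈ (image.getD 0 []).take image.length, x = y) ∧
       ∀ row ∈ image, row.take image.length = (image.getD 0 []).take image.length) := by
  unfold whole_alt
  simp only [Bool.and_eq_true, decide_eq_true_eq, List.all_eq_true, beq_iff_eq,
    PySem.List.slice_to_natCast, PySem.List.pyGetD_zero, pv_set_le_one]

-- ===== VERDICT (by name: the statement is the Claim_ definition above) =====

theorem whole_spec : Claim_equal_whole := by
  intro image _ hpre
  obtain ⟨hne, hragged⟩ := hpre
  unfold Spec_whole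
  have hn : 0 < image.length := List.length_pos_iff.mpr hne
  set n := image.length with hndef
  set row0 := image.getD 0 [] with hrow0
  have hmain : (∀ a < n, ∀ b < n, (image.getD a []).getD b 0 = pvFirst image) ↔
      ((∀ x ∈ row0.take n, ∀ y ∈ row0.take n, x = y) ∧
       ∀ row ∈ image, row.take n = row0.take n) := by
    constructor
    · intro hall
      -- every row is at least n long
      have hlong : ∀ a < n, n ≤ (image.getD a []).length := by
        intro a ha
        by_contra hshort
        obtain ⟨i', hi'a, j', hj'n, _, hj'len, hneq⟩ := hragged a ha (by omega)
        exact hneq (hall i' (by omega) j' hj'n)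
      have hr0 : n ≤ row0.length := hlong 0 hn
      have hcell : ∀ a, a < n → ∀ b, b < n → ∀ (h : b < (image.getD a []).length),
          (image.getD a [])[b] = pvFirst image := by
        intro a ha b hb h
        have := hall a ha b hb
        rwa [List.getD_eq_getElem _ _ h] at this
      constructor
      · intro x hx y hy
        obtain ⟨bx, hbx, rfl⟩ := List.mem_iff_getElem.mp hx
        obtain ⟨by', hby, rfl⟩ := List.mem_iff_getElem.mp hy
        simp only [List.length_take, lt_min_iff] at hbx hby
        rw [List.getElem_take, List.getElem_take]
        exact (hcell 0 hn bx hbx.1 hbx.2).trans (hcell 0 hn by' hby.1 hby.2).symm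
      · intro row hrow
        obtain ⟨a, ha, rfl⟩ := List.mem_iff_getElem.mp hrow
        have hgd : image.getD a [] = image[a] := List.getD_eq_getElem _ _ ha
        apply List.ext_getElem
        · simp only [List.length_take]
          have := hlong a ha
          rw [hgd] at this
          omega
        · intro b hb1 hb2
          have hbn : b < n := by simp only [List.length_take] at hb1; omega
          rw [List.getElem_take, List.getElem_take]
          have hblen : b < (image.getD a []).length := by
            have := hlong a ha; omega
          have e1 := hcell a ha b hbn hblen
          have hbr0 : b < row0.length := by omega
          have e2 := hcell 0 hn b hbn hbr0
          simp only [hgd] at e1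
          exact e1.trans e2.symm
    · rintro ⟨hconst, hpref⟩
      -- row0 is at least n long
      have hr0 : n ≤ row0.length := by
        by_contra hshort
        obtain ⟨i', hi'0, j', hj'n, _, hj'len, hneq⟩ := hragged 0 hn (by rw [← hrow0]; omega)
        interval_cases i'
        rw [← hrow0] at hj'len hneq
        have hj'r0 : j' < row0.length := hj'len
        have hmem1 : row0[j'] ∈ List.take n row0 :=
          List.mem_iff_getElem.mpr ⟨j', by simp only [List.length_take, lt_min_iff]; omega, List.getElem_take⟩
        have h0n : 0 < row0.length := by omega
        have hmem0 : row0[0] ∈ List.take n row0 :=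
          List.mem_iff_getElem.mpr ⟨0, by simp only [List.length_take, lt_min_iff]; omega, List.getElem_take⟩
        apply hneq
        rw [List.getD_eq_getElem _ _ hj'r0, List.getD_eq_getElem _ _ h0n]
        exact hconst _ hmem1 _ hmem0
      intro a ha b hb
      have hgdmem : image.getD a [] ∈ image := by
        rw [List.getD_eq_getElem _ _ ha]; exact List.getElem_mem ha
      have hpr := hpref _ hgdmem
      have hlen : n ≤ (image.getD a []).length := by
        have := congrArg List.length hpr
        simp only [List.length_take] at this
        omega
      have hblen : b < (image.getD a []).length := by omega
      rw [List.getD_eq_getElem _ _ hblen]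
      have hmem : (image.getD a [])[b] ∈ List.take n row0 := by
        rw [← hpr]
        exact List.mem_iff_getElem.mpr ⟨b, by simp only [List.length_take, lt_min_iff]; omega, List.getElem_take⟩
      have h0n : 0 < row0.length := by omega
      have hmem0 : row0[0] ∈ List.take n row0 :=
        List.mem_iff_getElem.mpr ⟨0, by simp only [List.length_take, lt_min_iff]; omega, List.getElem_take⟩
      have hfirst : pvFirst image = row0[0] := by
        show (image.getD 0 []).getD 0 0 = row0[0]
        rw [← hrow0]
        exact List.getD_eq_getElem _ _ h0n
      rw [hfirst]
      exact hconst _ hmem _ hmem0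
  have hA := pv_A_char image
  have hB := pv_B_char image
  have : whole image = true ↔ whole_alt image = true := by
    rw [hA, hB]; exact hmain
  exact Bool.eq_iff_iff.mpr this
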